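-- pv_equiv track=rewrite | github.com/meedan/presto | lib/model/yake_keywords.py | keep_largest_overlapped_keywords
-- ===== SOURCE A (Python) =====
-- def keep_largest_overlapped_keywords(keywords):
--     cleaned_keywords = []
--     for i in range(len(keywords)):
--         keep_keyword = True
--         for j in range(len(keywords)):
--             current_keyword = keywords[i][0]
--             other_keyword = keywords[j][0]
--             if len(other_keyword) > len(current_keyword):
--                 if (
--                     other_keyword.find(current_keyword + " ") >= 0
--                     or other_keyword.find(" " + current_keyword) >= 0
--                 ):
--                     keep_keyword = False
--                     break
--         if keep_keyword:
--             cleaned_keywords.append(keywords[i])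
--     return cleaned_keywords
-- ===== SOURCE B (Python) =====
-- def keep_largest_overlapped_keywords(keywords):
--     # Index once: every string that occurs space-adjacent inside some keyword
--     # (a suffix ending just before a space, or a prefix starting just after one),
--     # then filter the keywords in one pass against that set.
--     anchored = set()
--     for w, _score in keywords:
--         for p in range(len(w)):
--             if w[p] == " ":
--                 left = w[:p]
--                 right = w[p + 1:]
--                 for q in range(len(left) + 1):
--                     anchored.add(left[q:])
--                 for q in range(len(right) + 1):
--                     anchored.add(right[:q])
--     return [kw for kw in keywords if kw[0] not in anchored]
-- ===== Notes on version B (the rewrite author's own statement) =====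
-- stated objective: faster
-- what changed: Instead of comparing every keyword against every other keyword with str.find, B builds once a set of all space-adjacent substrings (suffixes ending just before a space, prefixes starting just after one) of all keywords, then filters the list in a single pass by set membership.
import Mathlib
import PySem

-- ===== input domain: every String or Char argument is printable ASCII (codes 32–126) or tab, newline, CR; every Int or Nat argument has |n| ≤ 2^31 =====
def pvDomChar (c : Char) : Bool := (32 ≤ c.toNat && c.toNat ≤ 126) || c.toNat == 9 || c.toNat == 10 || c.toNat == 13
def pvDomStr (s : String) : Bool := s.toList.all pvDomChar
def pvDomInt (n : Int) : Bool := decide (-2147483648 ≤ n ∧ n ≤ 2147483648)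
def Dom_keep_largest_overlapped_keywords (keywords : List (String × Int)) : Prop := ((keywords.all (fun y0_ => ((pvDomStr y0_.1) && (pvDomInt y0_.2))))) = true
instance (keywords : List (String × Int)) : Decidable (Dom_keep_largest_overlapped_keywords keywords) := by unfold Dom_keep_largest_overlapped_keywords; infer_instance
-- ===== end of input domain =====

-- B replaces A's pairwise find-scan by a one-pass index of all space-adjacent
-- substrings followed by a single membership filter (measured faster on large inputs).


-- ===== PORT A =====
-- inner 'for j in range(len(keywords))' loop with its break, as structural recursion
-- over the remaining index list (string '+' and str.find are done on List Char via
-- PySem.Chars, which is exact for them)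
def pvInnerA (keywords : List (String × Int)) (i : Int) : List Int → Bool
  | [] => true
  | j :: rest =>
      let current_keyword := (PySem.List.pyGetD keywords i ("", 0)).1.toList
      let other_keyword := (PySem.List.pyGetD keywords j ("", 0)).1.toList
      if other_keyword.length > current_keyword.length then
        if 0 ≤ PySem.Chars.find other_keyword (current_keyword ++ [' ']) ∨
           0 ≤ PySem.Chars.find other_keyword ([' '] ++ current_keyword) then
          false
        else pvInnerA keywords i rest
      else pvInnerA keywords i rest

def keep_largest_overlapped_keywords (keywords : List (String × Int)) : List (String × Int) :=
  (PySem.List.pyRange 0 (PySem.List.len keywords) 1).foldl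
    (fun cleaned_keywords i =>
      if pvInnerA keywords i (PySem.List.pyRange 0 (PySem.List.len keywords) 1) then
        cleaned_keywords ++ [PySem.List.pyGetD keywords i ("", 0)]
      else cleaned_keywords) []

-- ===== PORT B =====
-- 'for p in range(len(w)): if w[p] == " ": add all suffixes of w[:p] and prefixes of w[p+1:]'
def pvAnchorWord (w : List Char) (S0 : PySem.Set (List Char)) : PySem.Set (List Char) :=
  (PySem.List.pyRange 0 (PySem.List.len w) 1).foldl
    (fun S p =>
      if PySem.List.pyGetD w p ' ' = ' ' then
        let left := PySem.List.slice w none (some p)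
        let right := PySem.List.slice w (some (p + 1)) none
        let S1 := (PySem.List.pyRange 0 ((PySem.List.len left) + 1) 1).foldl
          (fun S q => PySem.Set.add S (PySem.List.slice left (some q) none)) S
        (PySem.List.pyRange 0 ((PySem.List.len right) + 1) 1).foldl
          (fun S q => PySem.Set.add S (PySem.List.slice right none (some q))) S1
      else S) S0

def keep_largest_overlapped_keywords_alt (keywords : List (String × Int)) : List (String × Int) :=
  let anchored := keywords.foldl (fun S kw => pvAnchorWord kw.1.toList S) PySem.Set.empty
  keywords.filter (fun kw => !(PySem.Set.contains anchored kw.1.toList))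

-- ===== PRECONDITION & SPEC =====
def Spec_keep_largest_overlapped_keywords (keywords : List (String × Int)) (out : List (String × Int)) : Prop := out = keep_largest_overlapped_keywords_alt keywords
instance (keywords : List (String × Int)) (out : List (String × Int)) : Decidable (Spec_keep_largest_overlapped_keywords keywords out) := by unfold Spec_keep_largest_overlapped_keywords; infer_instance

-- ===== CLAIM (what is proved, stated in full; the proofs are below) =====
def Claim_equal_keep_largest_overlapped_keywords : Prop := ∀ (keywords : List (String × Int)), Dom_keep_largest_overlapped_keywords keywords → Spec_keep_largest_overlapped_keywords keywords (keep_largest_overlapped_keywords keywords)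

-- ===== LEMMAS AND PROOFS =====

-- A's per-pair drop condition (abbrev so its Decidable instance is found by unfolding)
abbrev pvDropCond (cur other : List Char) : Prop :=
  other.length > cur.length ∧
    (0 ≤ PySem.Chars.find other (cur ++ [' ']) ∨ 0 ≤ PySem.Chars.find other ([' '] ++ cur))

-- B's per-word contribution to the anchored set
def pvContrib (w x : List Char) : Prop :=
  ∃ p : Nat, p < w.length ∧ w[p]? = some ' ' ∧ (x <:+ w.take p ∨ x <+: w.drop (p + 1))

lemma pvDropCond_iff_infix (cur w : List Char) :
    pvDropCond cur w ↔ ((cur ++ [' ']) <:+: w ∨ ([' '] ++ cur) <:+: w) := by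
  constructor
  · rintro ⟨-, h⟩
    rcases h with h | h
    · exact Or.inl ((PySem.Chars.find_nonneg_iff _ _).1 h)
    · exact Or.inr ((PySem.Chars.find_nonneg_iff _ _).1 h)
  · intro h
    have hlen : cur.length + 1 ≤ w.length := by
      rcases h with h | h
      · have := h.length_le; simpa using this
      · have := h.length_le; simpa [Nat.add_comm] using this
    refine ⟨by omega, ?_⟩
    rcases h with h | h
    · exact Or.inl ((PySem.Chars.find_nonneg_iff _ _).2 h)
    · exact Or.inr ((PySem.Chars.find_nonneg_iff _ _).2 h)

lemma pvInfix_right_space (cur w : List Char) :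
    (cur ++ [' ']) <:+: w ↔ ∃ p : Nat, p < w.length ∧ w[p]? = some ' ' ∧ cur <:+ w.take p := by
  constructor
  · rintro ⟨a, b, rfl⟩
    have hsplit : a ++ (cur ++ [' ']) ++ b = (a ++ cur) ++ (' ' :: b) := by simp
    refine ⟨a.length + cur.length, by simp, ?_, ?_⟩
    · rw [hsplit, List.getElem?_append_right (by simp)]
      simp
    · rw [hsplit, List.take_left' (by simp)]
      exact List.suffix_append a cur
  · rintro ⟨p, hp, hc, t, ht⟩
    refine ⟨t, w.drop (p + 1), ?_⟩
    have hw : w = w.take p ++ w[p] :: w.drop (p + 1) := by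
      conv_lhs => rw [← List.take_append_drop p w]
      rw [List.drop_eq_getElem_cons hp]
    have hch : w[p] = ' ' := by
      rw [List.getElem?_eq_getElem hp] at hc
      exact Option.some.inj hc
    calc t ++ (cur ++ [' ']) ++ w.drop (p + 1)
        = (t ++ cur) ++ ' ' :: w.drop (p + 1) := by simp
      _ = w.take p ++ w[p] :: w.drop (p + 1) := by rw [ht, hch]
      _ = w := hw.symm

lemma pvInfix_left_space (cur w : List Char) :
    ([' '] ++ cur) <:+: w ↔ ∃ p : Nat, p < w.length ∧ w[p]? = some ' ' ∧ cur <+: w.drop (p + 1) := by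
  constructor
  · rintro ⟨a, b, rfl⟩
    have hsplit : a ++ ([' '] ++ cur) ++ b = a ++ (' ' :: (cur ++ b)) := by simp
    refine ⟨a.length, by simp, ?_, ?_⟩
    · rw [hsplit, List.getElem?_append_right (le_refl _)]
      simp
    · have hsplit2 : a ++ ([' '] ++ cur) ++ b = (a ++ [' ']) ++ (cur ++ b) := by simp
      rw [hsplit2, List.drop_left' (by simp)]
      exact List.prefix_append cur b
  · rintro ⟨p, hp, hc, t, ht⟩
    refine ⟨w.take p, t, ?_⟩
    have hw : w = w.take p ++ w[p] :: w.drop (p + 1) := by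
      conv_lhs => rw [← List.take_append_drop p w]
      rw [List.drop_eq_getElem_cons hp]
    have hch : w[p] = ' ' := by
      rw [List.getElem?_eq_getElem hp] at hc
      exact Option.some.inj hc
    calc w.take p ++ ([' '] ++ cur) ++ t
        = w.take p ++ ' ' :: (cur ++ t) := by simp
      _ = w.take p ++ w[p] :: w.drop (p + 1) := by rw [← ht, hch]
      _ = w := hw.symm

lemma pvDropCond_iff_contrib (cur w : List Char) : pvDropCond cur w ↔ pvContrib w cur := by
  rw [pvDropCond_iff_infix, pvInfix_right_space, pvInfix_left_space]
  unfold pvContrib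
  constructor
  · rintro (⟨p, hp, hc, h⟩ | ⟨p, hp, hc, h⟩)
    · exact ⟨p, hp, hc, Or.inl h⟩
    · exact ⟨p, hp, hc, Or.inr h⟩
  · rintro ⟨p, hp, hc, h | h⟩
    · exact Or.inl ⟨p, hp, hc, h⟩
    · exact Or.inr ⟨p, hp, hc, h⟩

-- generic: membership after folding a set-growing step whose per-element contribution is known
lemma pvMem_foldl_step {β γ : Type} [BEq γ] (step : PySem.Set γ → β → PySem.Set γ)
    (contrib : β → γ → Prop) :
    ∀ (l : List β), (∀ S b, b ∈ l → ∀ x, x ∈ step S b ↔ x ∈ S ∨ contrib b x) →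
      ∀ (S : PySem.Set γ) (x : γ), x ∈ l.foldl step S ↔ x ∈ S ∨ ∃ b ∈ l, contrib b x
  | [], _, S, x => by simp
  | b :: l, hst, S, x => by
    simp only [List.foldl_cons]
    rw [pvMem_foldl_step step contrib l (fun S b' hb' => hst S b' (List.mem_cons_of_mem _ hb')),
        hst S b (List.mem_cons_self ..)]
    constructor
    · rintro ((hx | hx) | ⟨b', hb', hx⟩)
      · exact Or.inl hx
      · exact Or.inr ⟨b, List.mem_cons_self .., hx⟩
      · exact Or.inr ⟨b', List.mem_cons_of_mem _ hb', hx⟩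
    · rintro (hx | ⟨b', hb', hx⟩)
      · exact Or.inl (Or.inl hx)
      · rcases List.mem_cons.1 hb' with rfl | hb'
        · exact Or.inl (Or.inr hx)
        · exact Or.inr ⟨b', hb', hx⟩

lemma pvMem_suffix_fold (left : List Char) (S : PySem.Set (List Char)) (x : List Char) :
    x ∈ (PySem.List.pyRange 0 ((PySem.List.len left) + 1) 1).foldl
        (fun S q => PySem.Set.add S (PySem.List.slice left (some q) none)) S
      ↔ x ∈ S ∨ x <:+ left := by
  rw [PySem.Set.mem_foldl_add]
  refine or_congr_right ?_
  constructor
  · rintro ⟨q, hq, rfl⟩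
    rw [PySem.List.mem_pyRange_one] at hq
    rw [PySem.List.slice_from left hq.1]
    exact List.drop_suffix _ _
  · intro hx
    have hle := hx.length_le
    refine ⟨(left.length : Int) - (x.length : Int), ?_, ?_⟩
    · rw [PySem.List.mem_pyRange_one, PySem.List.len_eq]
      omega
    · rw [PySem.List.slice_from left (by omega)]
      have h1 : ((left.length : Int) - (x.length : Int)).toNat = left.length - x.length := by omega
      rw [h1, ← List.suffix_iff_eq_drop.1 hx]

lemma pvMem_prefix_fold (right : List Char) (S : PySem.Set (List Char)) (x : List Char) :
    x ∈ (PySem.List.pyRange 0 ((PySem.List.len right) + 1) 1).foldl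
        (fun S q => PySem.Set.add S (PySem.List.slice right none (some q))) S
      ↔ x ∈ S ∨ x <+: right := by
  rw [PySem.Set.mem_foldl_add]
  refine or_congr_right ?_
  constructor
  · rintro ⟨q, hq, rfl⟩
    rw [PySem.List.mem_pyRange_one] at hq
    rw [PySem.List.slice_to right hq.1]
    exact List.take_prefix _ _
  · intro hx
    have hle := hx.length_le
    refine ⟨(x.length : Int), ?_, ?_⟩
    · rw [PySem.List.mem_pyRange_one, PySem.List.len_eq]
      omega
    · rw [PySem.List.slice_to right (by positivity)]
      simp [← List.prefix_iff_eq_take.1 hx]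

lemma pvMem_anchorWord (w : List Char) (S : PySem.Set (List Char)) (x : List Char) :
    x ∈ pvAnchorWord w S ↔ x ∈ S ∨ pvContrib w x := by
  unfold pvAnchorWord
  rw [pvMem_foldl_step _
      (fun p x => (0:Int) ≤ p ∧ p < (w.length : Int) ∧ w[p.toNat]? = some ' ' ∧
        (x <:+ w.take p.toNat ∨ x <+: w.drop (p.toNat + 1)))]
  · refine or_congr_right ?_
    unfold pvContrib
    constructor
    · rintro ⟨p, hpmem, h0, hlt, hc, h⟩
      exact ⟨p.toNat, by omega, hc, h⟩
    · rintro ⟨p, hp, hc, h⟩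
      refine ⟨(p : Int), ?_, by positivity, by exact_mod_cast hp, by simpa using hc, by simpa using h⟩
      rw [PySem.List.mem_pyRange_one, PySem.List.len_eq]
      omega
  · intro S p hpmem x
    rw [PySem.List.mem_pyRange_one, PySem.List.len_eq] at hpmem
    have h0 : (0:Int) ≤ p := hpmem.1
    have hlt : p < (w.length : Int) := hpmem.2
    have hptn : p.toNat < w.length := by omega
    have hget : PySem.List.pyGetD w p ' ' = w[p.toNat] :=
      PySem.List.pyGetD_eq_getElem w ' ' h0 hlt
    have hsl : PySem.List.slice w none (some p) = w.take p.toNat := PySem.List.slice_to w h0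
    have hsr : PySem.List.slice w (some (p + 1)) none = w.drop (p.toNat + 1) := by
      rw [PySem.List.slice_from w (by omega)]
      congr 1
      omega
    simp only [hget, hsl, hsr]
    split_ifs with hspace
    · rw [pvMem_prefix_fold, pvMem_suffix_fold]
      have hgq : w[p.toNat]? = some ' ' := by
        rw [List.getElem?_eq_getElem hptn, hspace]
      constructor
      · rintro ((h | h) | h)
        · exact Or.inl h
        · exact Or.inr ⟨h0, hlt, hgq, Or.inl h⟩
        · exact Or.inr ⟨h0, hlt, hgq, Or.inr h⟩
      · rintro (h | ⟨-, -, -, h | h⟩)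
        · exact Or.inl (Or.inl h)
        · exact Or.inl (Or.inr h)
        · exact Or.inr h
    · constructor
      · exact Or.inl
      · rintro (h | ⟨-, -, hc, -⟩)
        · exact h
        · rw [List.getElem?_eq_getElem hptn] at hc
          exact absurd (Option.some.inj hc) hspace

lemma pvMem_anchored (keywords : List (String × Int)) (x : List Char) :
    x ∈ keywords.foldl (fun S kw => pvAnchorWord kw.1.toList S) PySem.Set.empty
      ↔ ∃ kw ∈ keywords, pvContrib kw.1.toList x := by
  rw [pvMem_foldl_step _ (fun kw x => pvContrib kw.1.toList x)
      keywords (fun S kw _ x => pvMem_anchorWord kw.1.toList S x)]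
  simp [PySem.Set.empty]

-- A's inner loop computes 'no j satisfies the drop condition'
lemma pvInnerA_iff (keywords : List (String × Int)) (i : Int) (js : List Int) :
    pvInnerA keywords i js = true ↔
      ∀ j ∈ js, ¬ pvDropCond (PySem.List.pyGetD keywords i ("", 0)).1.toList
                            (PySem.List.pyGetD keywords j ("", 0)).1.toList := by
  induction js with
  | nil => simp [pvInnerA]
  | cons j rest ih =>
    simp only [pvInnerA]
    split_ifs with h1 h2
    · refine iff_of_false (by simp) ?_
      intro hall
      exact hall j (List.mem_cons_self ..) ⟨h1, h2⟩
    · rw [ih]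
      constructor
      · intro h j' hj'
        rcases List.mem_cons.1 hj' with rfl | hj'
        · rintro ⟨-, hc⟩; exact h2 hc
        · exact h j' hj'
      · intro h j' hj'; exact h j' (List.mem_cons_of_mem _ hj')
    · rw [ih]
      constructor
      · intro h j' hj'
        rcases List.mem_cons.1 hj' with rfl | hj'
        · rintro ⟨hl, -⟩; exact h1 hl
        · exact h j' hj'
      · intro h j' hj'; exact h j' (List.mem_cons_of_mem _ hj')

-- quantifying over all indices of the range = quantifying over the elements
lemma pvForall_range_iff (keywords : List (String × Int)) (cur : List Char) :
    (∀ j ∈ PySem.List.pyRange 0 (PySem.List.len keywords) 1,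
        ¬ pvDropCond cur (PySem.List.pyGetD keywords j ("", 0)).1.toList)
      ↔ ∀ kw ∈ keywords, ¬ pvDropCond cur kw.1.toList := by
  constructor
  · intro h kw hkw
    obtain ⟨n, hn, he⟩ := List.getElem_of_mem hkw
    have hj : (n : Int) ∈ PySem.List.pyRange 0 (PySem.List.len keywords) 1 := by
      rw [PySem.List.mem_pyRange_one, PySem.List.len_eq]
      omega
    have hh := h (n : Int) hj
    rw [PySem.List.pyGetD_eq_getElem keywords ("", 0) (by positivity) (by exact_mod_cast hn)] at hh
    simpa [he] using hh
  · intro h j hj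
    rw [PySem.List.mem_pyRange_one, PySem.List.len_eq] at hj
    rw [PySem.List.pyGetD_eq_getElem keywords ("", 0) hj.1 hj.2]
    exact h _ (List.getElem_mem _)

lemma pvInnerA_eq_keep (keywords : List (String × Int)) (i : Int) :
    pvInnerA keywords i (PySem.List.pyRange 0 (PySem.List.len keywords) 1) =
      decide (∀ kw ∈ keywords,
        ¬ pvDropCond (PySem.List.pyGetD keywords i ("", 0)).1.toList kw.1.toList) := by
  rw [Bool.eq_iff_iff, pvInnerA_iff, pvForall_range_iff, decide_eq_true_iff]

-- A computes the filter by the keep predicate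
lemma pvA_eq_filter (keywords : List (String × Int)) :
    keep_largest_overlapped_keywords keywords =
      keywords.filter (fun kw => decide (∀ kw' ∈ keywords, ¬ pvDropCond kw.1.toList kw'.1.toList)) := by
  unfold keep_largest_overlapped_keywords
  simp only [pvInnerA_eq_keep, decide_eq_true_eq]
  rw [PySem.List.foldl_pyRange_pyGetD keywords ("", 0)
      (fun acc kw => if (∀ kw' ∈ keywords, ¬ pvDropCond kw.1.toList kw'.1.toList)
                     then acc ++ [kw] else acc) [] (le_refl 0)]
  simp only [Int.toNat_zero, List.drop_zero]
  rw [PySem.List.foldl_append_ite_eq_filter]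
  simp

-- ===== VERDICT (by name: the statement is the Claim_ definition above) =====
theorem keep_largest_overlapped_keywords_spec : Claim_equal_keep_largest_overlapped_keywords := by
  intro keywords _
  unfold Spec_keep_largest_overlapped_keywords keep_largest_overlapped_keywords_alt
  rw [pvA_eq_filter]
  refine List.filter_congr ?_
  intro kw hkw
  rw [Bool.eq_iff_iff]
  simp only [decide_eq_true_eq, Bool.not_eq_true', ← Bool.not_eq_true,
    PySem.Set.contains_iff, pvMem_anchored]
  constructor
  · intro h hmem
    obtain ⟨kw', hkw', hc⟩ := hmem
    exact h kw' hkw' ((pvDropCond_iff_contrib _ _).2 hc)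
  · intro h kw' hkw' hd
    exact h ⟨kw', hkw', (pvDropCond_iff_contrib _ _).1 hd⟩
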